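-- pv_equiv track=rewrite | github.com/amrithajayadev/misc | sliding_window/max_len_positive_product_subarray.py | max_len_pos_product_subarray_non_window
-- ===== SOURCE A (Python) =====
-- def max_len_pos_product_subarray_non_window(nums):
--     pos = [0] * len(nums)
--     neg = [0] * len(nums)
--     for i in range(len(nums)):
--         if nums[i] == 0:
--             pos[i] = 0
--             neg[i] = 0
--         elif nums[i] > 0:
--             pos[i] = pos[i-1] + 1
--             neg[i] = 0 if neg[i-1] == 0 else neg[i-1] + 1
--         else:
--             pos[i] = 0 if neg[i-1] == 0 else neg[i-1] + 1
--             neg[i] = pos[i-1] + 1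
--     return max(pos)
-- ===== SOURCE B (Python) =====
-- def max_len_pos_product_subarray_non_window(nums):
--     # Zero-delimited segment scan: one candidate per segment (even negative
--     # count -> whole segment; odd -> trim to first/last negative), 0 per zero.
--     candidates = []
--     i, n = 0, len(nums)
--     while i < n:
--         if nums[i] == 0:
--             candidates.append(0)
--             i += 1
--         else:
--             start = i
--             cnt, first, last = 0, -1, -1
--             while i < n and nums[i] != 0:
--                 if nums[i] < 0:
--                     cnt += 1
--                     last = i
--                     if first == -1:
--                         first = i
--                 i += 1
--             end = i - 1
--             if cnt % 2 == 0:
--                 candidates.append(end - start + 1)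
--             else:
--                 candidates.append(max(last - start, end - first))
--     return max(candidates)
-- ===== Notes on version B (the rewrite author's own statement) =====
-- stated objective: alternative
-- what changed: Replaces the per-index pos/neg DP arrays with a single pass over maximal zero-delimited segments, emitting one candidate per segment from its negative count and first/last negative position.
import Mathlib
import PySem

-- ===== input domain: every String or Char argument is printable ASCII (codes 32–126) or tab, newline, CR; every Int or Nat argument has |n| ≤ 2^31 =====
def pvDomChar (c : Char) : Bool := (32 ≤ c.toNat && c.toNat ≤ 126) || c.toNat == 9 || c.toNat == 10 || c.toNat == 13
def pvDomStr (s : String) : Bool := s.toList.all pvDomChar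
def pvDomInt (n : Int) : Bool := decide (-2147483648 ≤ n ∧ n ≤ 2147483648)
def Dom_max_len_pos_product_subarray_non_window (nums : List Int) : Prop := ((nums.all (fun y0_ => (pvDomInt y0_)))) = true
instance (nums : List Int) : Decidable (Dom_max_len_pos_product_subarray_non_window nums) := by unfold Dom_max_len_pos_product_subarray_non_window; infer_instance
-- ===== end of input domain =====

-- B replaces A's per-index pos/neg DP arrays with a single pass over maximal
-- zero-delimited segments (alternative decomposition; same O(n) cost).

-- ===== PORT A =====
-- Transliteration of A: two length-n arrays updated over range(len(nums)).
-- Python's pos[i-1]/neg[i-1] (negative index at i = 0 reads the last, still-0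
-- cell) is PySem.List.pyGet? (i-1); inside range(len) it never raises, so
-- .getD 0 is exact.  max(pos) is PySem.List.max?; the none arm (empty list,
-- Python's ValueError) is excluded by Pre_.
def max_len_pos_product_subarray_non_window (nums : List Int) : Int :=
  let n : Int := nums.length
  let init : List Int × List Int := (List.replicate nums.length 0, List.replicate nums.length 0)
  let res := (PySem.List.pyRange 0 n 1).foldl (fun (st : List Int × List Int) j =>
    let pos := st.1
    let neg := st.2
    let x := (PySem.List.pyGet? nums j).getD 0
    if x = 0 then
      (pos.set j.toNat 0, neg.set j.toNat 0)
    else if x > 0 then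
      let p1 := (PySem.List.pyGet? pos (j - 1)).getD 0
      let n1 := (PySem.List.pyGet? neg (j - 1)).getD 0
      (pos.set j.toNat (p1 + 1), neg.set j.toNat (if n1 = 0 then 0 else n1 + 1))
    else
      let p1 := (PySem.List.pyGet? pos (j - 1)).getD 0
      let n1 := (PySem.List.pyGet? neg (j - 1)).getD 0
      (pos.set j.toNat (if n1 = 0 then 0 else n1 + 1), neg.set j.toNat (p1 + 1))) init
  match PySem.List.max? res.1 (fun y => y) with
  | some m => m
  | none => 0   -- unreachable under Pre_ (nums ≠ [])

-- ===== PORT B =====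
-- B's inner while-loop over one zero-free segment: fold over enumerate(seg)
-- updating (cnt, first, last).  Indices are relative to the segment start
-- (Source B subtracts `start` from every index it uses, so this is exact).
def pvSegScan (seg : List Int) : Int × Int × Int :=
  (PySem.List.enumerate seg 0).foldl
    (fun (st : Int × Int × Int) p =>
      if p.2 < 0 then (st.1 + 1, (if st.2.1 = -1 then p.1 else st.2.1), p.1) else st)
    (0, -1, -1)

-- B's outer while-loop: consume one zero (candidate 0) or one maximal
-- zero-free segment (one candidate) per iteration.
def pvGoB : List Int → List Int
  | [] => []
  | x :: rest =>
    if x = 0 then 0 :: pvGoB rest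
    else
      let seg := (x :: rest).takeWhile (· ≠ 0)
      let rest' := (x :: rest).dropWhile (· ≠ 0)
      let s := pvSegScan seg
      let len : Int := seg.length
      (if s.1 % 2 = 0 then len else max (s.2.2 - 0) ((len - 1) - s.2.1)) :: pvGoB rest'
  termination_by l => l.length
  decreasing_by
    · simp
    · rename_i h
      rw [List.dropWhile_cons, if_pos (by simpa using h)]
      exact Nat.lt_succ_of_le (List.length_dropWhile_le _ _)

def max_len_pos_product_subarray_non_window_alt (nums : List Int) : Int :=
  match PySem.List.max? (pvGoB nums) (fun y => y) with
  | some m => m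
  | none => 0   -- unreachable under Pre_ (nums ≠ [])

-- ===== PRECONDITION & SPEC =====
-- A raises ValueError (max() of an empty list) exactly on nums = []; excluded.
def Pre_max_len_pos_product_subarray_non_window (nums : List Int) : Prop := nums ≠ []
instance (nums : List Int) : Decidable (Pre_max_len_pos_product_subarray_non_window nums) := by unfold Pre_max_len_pos_product_subarray_non_window; infer_instance
def pvWitness_max_len_pos_product_subarray_non_window : List Int := [2, -3, 0, 4, 5]

def Spec_max_len_pos_product_subarray_non_window (nums : List Int) (out : Int) : Prop := out = max_len_pos_product_subarray_non_window_alt nums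
instance (nums : List Int) (out : Int) : Decidable (Spec_max_len_pos_product_subarray_non_window nums out) := by unfold Spec_max_len_pos_product_subarray_non_window; infer_instance

-- ===== CLAIM (what is proved, stated in full; the proofs are below) =====
def Claim_equal_max_len_pos_product_subarray_non_window : Prop := ∀ (nums : List Int), Dom_max_len_pos_product_subarray_non_window nums → Pre_max_len_pos_product_subarray_non_window nums → Spec_max_len_pos_product_subarray_non_window nums (max_len_pos_product_subarray_non_window nums)

-- ===== LEMMAS AND PROOFS =====

-- Clean model of A's DP step: state = (pos[i], neg[i]).
def pvStep (s : Int × Int) (x : Int) : Int × Int :=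
  if x = 0 then (0, 0)
  else if x > 0 then (s.1 + 1, if s.2 = 0 then 0 else s.2 + 1)
  else (if s.2 = 0 then 0 else s.2 + 1, s.1 + 1)

-- The list of DP states along l starting from s.
def pvStates (s : Int × Int) : List Int → List (Int × Int)
  | [] => []
  | x :: xs => pvStep s x :: pvStates (pvStep s x) xs

theorem pvStates_length (s : Int × Int) (l : List Int) : (pvStates s l).length = l.length := by
  induction l generalizing s with
  | nil => rfl
  | cons x xs ih => simp [pvStates, ih]

theorem pvStates_append (s : Int × Int) (l₁ l₂ : List Int) :
    pvStates s (l₁ ++ l₂) = pvStates s l₁ ++ pvStates (l₁.foldl pvStep s) l₂ := by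
  induction l₁ generalizing s with
  | nil => rfl
  | cons x xs ih => simp [pvStates, ih, List.foldl_cons]

theorem pvStates_getLast? (s : Int × Int) (l : List Int) (h : l ≠ []) :
    (pvStates s l).getLast? = some (l.foldl pvStep s) := by
  induction l generalizing s with
  | nil => exact absurd rfl h
  | cons x xs ih =>
    cases xs with
    | nil => simp [pvStates, List.foldl]
    | cons y ys =>
      rw [List.foldl_cons]
      rw [← ih (pvStep s x) (by simp)]
      simp [pvStates]

theorem pvStates_zero_head (s : Int × Int) (t : List Int) :
    pvStates s (0 :: t) = pvStates (0, 0) (0 :: t) := by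
  simp [pvStates, pvStep]

theorem pvSet_prefix (pre : List Int) (k : Nat) (v : Int) (hk : 0 < k) :
    (pre ++ List.replicate k (0:Int)).set pre.length v
      = (pre ++ [v]) ++ List.replicate (k - 1) 0 := by
  rw [List.set_append_right _ _ (Nat.le_refl _)]
  simp only [Nat.sub_self]
  cases k with
  | zero => omega
  | succ m => simp [List.replicate_succ]

theorem pvFoldlMax (l : List Int) (a b : Int) :
    List.foldl max (max a b) l = max a (List.foldl max b l) := by
  induction l generalizing b with
  | nil => rfl
  | cons x xs ih => simp only [List.foldl_cons, max_assoc, ih]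

theorem pvMaxQ_append (a b : List Int) :
    PySem.List.max? (a ++ b) (fun y => y)
      = match PySem.List.max? a (fun y => y), PySem.List.max? b (fun y => y) with
        | some x, some y => some (max x y)
        | some x, none => some x
        | none, mb => mb := by
  cases a with
  | nil =>
    show PySem.List.max? b _ = _
    cases hb : PySem.List.max? b (fun y => y) <;> rfl
  | cons x t =>
    rw [List.cons_append, PySem.List.max?_id_cons, PySem.List.max?_id_cons, List.foldl_append]
    cases b with
    | nil => rfl
    | cons y u =>
      rw [PySem.List.max?_id_cons]
      show some (List.foldl max (max (List.foldl max x t) y) u) = some (max _ (List.foldl max y u))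
      rw [pvFoldlMax]

theorem pvMaxQ_snoc (a : List Int) (v M : Int)
    (h : PySem.List.max? a (fun y => y) = some M) :
    PySem.List.max? (a ++ [v]) (fun y => y) = some (max M v) := by
  rw [pvMaxQ_append, h]
  rfl

theorem pvMaxQ_cons_congr (x : Int) (a b : List Int)
    (h : PySem.List.max? a (fun y => y) = PySem.List.max? b (fun y => y)) :
    PySem.List.max? (x :: a) (fun y => y) = PySem.List.max? (x :: b) (fun y => y) := by
  have ha := pvMaxQ_append [x] a
  have hb := pvMaxQ_append [x] b
  simp only [List.singleton_append] at ha hb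
  rw [ha, hb, h]

theorem pvDropWhile_head (p : Int → Bool) (l : List Int) :
    ∀ y ∈ (l.dropWhile p).head?, p y = false := by
  induction l with
  | nil => simp
  | cons x xs ih =>
    rw [List.dropWhile_cons]
    split
    · exact ih
    · simpa using by rename_i h; simpa using h

theorem pvSegScan_snoc (t : List Int) (x : Int) :
    pvSegScan (t ++ [x]) = (if x < 0 then ((pvSegScan t).1 + 1,
        (if (pvSegScan t).2.1 = -1 then (t.length : Int) else (pvSegScan t).2.1),
        (t.length : Int)) else pvSegScan t) := by
  unfold pvSegScan
  rw [PySem.List.enumerate_append, List.foldl_append]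
  simp [PySem.List.enumerate_cons, PySem.List.enumerate_nil]

-- the bundled segment invariant
theorem pvSegInv (l : List Int) (hz : ∀ y ∈ l, y ≠ 0) (hl : l ≠ []) :
    (((pvSegScan l).1 = 0 → (pvSegScan l).2.1 = -1 ∧ (pvSegScan l).2.2 = -1 ∧
        l.foldl pvStep (0,0) = ((l.length : Int), 0)) ∧
     ((pvSegScan l).1 ≠ 0 →
        0 ≤ (pvSegScan l).2.1 ∧ (pvSegScan l).2.1 ≤ (pvSegScan l).2.2 ∧
        (pvSegScan l).2.2 ≤ (l.length : Int) - 1 ∧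
        (2 ≤ (pvSegScan l).1 → (pvSegScan l).2.1 < (pvSegScan l).2.2) ∧
        ((pvSegScan l).1 % 2 = 0 →
          l.foldl pvStep (0,0) = ((l.length : Int), (l.length : Int) - 1 - (pvSegScan l).2.1)) ∧
        ((pvSegScan l).1 % 2 ≠ 0 →
          l.foldl pvStep (0,0) = ((l.length : Int) - 1 - (pvSegScan l).2.1, (l.length : Int)))) ∧
     0 ≤ (pvSegScan l).1 ∧
     PySem.List.max? ((pvStates (0,0) l).map Prod.fst) (fun y => y)
       = some (if (pvSegScan l).1 % 2 = 0 then (l.length : Int)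
               else max ((pvSegScan l).2.2 - 0) (((l.length : Int) - 1) - (pvSegScan l).2.1))) := by
  induction l using List.reverseRecOn with
  | nil => exact absurd rfl hl
  | append_singleton t x ih =>
    have hx : x ≠ 0 := hz x (by simp)
    rw [pvSegScan_snoc, List.foldl_append]
    have hpv : (pvStates (0,0) (t ++ [x])).map Prod.fst
        = (pvStates (0,0) t).map Prod.fst ++ [(pvStep (t.foldl pvStep (0,0)) x).1] := by
      rw [pvStates_append]
      simp [pvStates]
    cases t with
    | nil =>
      simp only [List.length_nil, List.foldl_nil, List.nil_append] at *
      rcases lt_trichotomy x 0 with hlt | heq | hgt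
      · simp only [if_pos hlt]
        refine ⟨by intro h; simp [pvSegScan] at h, ?_, by simp [pvSegScan], ?_⟩
        · intro _
          simp [pvSegScan, pvStep, hx, not_lt.mpr (le_of_lt hlt)]
        · simp [pvStates, pvStep, hx, not_lt.mpr (le_of_lt hlt), pvSegScan,
            PySem.List.max?_id_cons]
      · exact absurd heq hx
      · simp only [if_neg (not_lt.mpr (le_of_lt hgt))]
        refine ⟨?_, by intro h; simp [pvSegScan] at h, by simp [pvSegScan], ?_⟩
        · intro _
          refine ⟨by simp [pvSegScan], by simp [pvSegScan], ?_⟩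
          simp [pvStep, hx, hgt]
        · simp [pvStates, pvStep, hx, hgt, pvSegScan, PySem.List.max?_id_cons]
    | cons a t' =>
      obtain ⟨ih0, ihpos, ihnn, ihM⟩ := ih (fun y hy => hz y (by simp at hy ⊢; tauto)) (by simp)
      rw [hpv, pvMaxQ_snoc _ _ _ ihM]
      have hfold : List.foldl pvStep (List.foldl pvStep (0,0) (a :: t')) [x]
          = pvStep (List.foldl pvStep (0,0) (a :: t')) x := rfl
      rw [hfold]
      have hlen' : ((((a :: t') ++ [x]).length : Nat) : Int) = ((a :: t').length : Int) + 1 := by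
        simp
      have hnn1 : (1 : Int) ≤ ((a :: t').length : Int) := by simp
      rcases lt_trichotomy x 0 with hlt | heq | hgt
      · -- x < 0 : one more negative, first fixed (or set), last = new index
        rw [if_pos hlt]
        by_cases h0 : (pvSegScan (a :: t')).1 = 0
        · obtain ⟨e1, e2, eF⟩ := ih0 h0
          have hF' : pvStep (List.foldl pvStep (0,0) (a :: t')) x = (0, ((a :: t').length : Int) + 1) := by
            rw [eF]; simp [pvStep, hx, not_lt.mpr (le_of_lt hlt)]
          refine ⟨?_, ?_, ?_, ?_⟩
          · intro h; dsimp only at h; omega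
          · intro _
            dsimp only
            rw [if_pos e1, hF', hlen']
            refine ⟨by omega, by omega, by omega, by intro h2; omega, ?_, ?_⟩
            · intro hp; omega
            · intro _; simp only [Prod.mk.injEq]; constructor <;> first | trivial | omega
          · dsimp only; omega
          · dsimp only
            rw [hF', if_pos e1, hlen', if_pos (by omega : (pvSegScan (a :: t')).1 % 2 = 0),
              if_neg (by omega : ¬ ((pvSegScan (a :: t')).1 + 1) % 2 = 0)]
            simp only [Option.some.injEq]
            omega
        · obtain ⟨hf0, hfl, hll, hstr, hev, hod⟩ := ihpos h0
          have e1' : ¬ (pvSegScan (a :: t')).2.1 = -1 := by omega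
          by_cases hp : (pvSegScan (a :: t')).1 % 2 = 0
          · -- even, ≥ 2 negatives so far
            have h2 : 2 ≤ (pvSegScan (a :: t')).1 := by omega
            have hF' : pvStep (List.foldl pvStep (0,0) (a :: t')) x
                = (((a :: t').length : Int) - (pvSegScan (a :: t')).2.1, ((a :: t').length : Int) + 1) := by
              rw [hev hp]
              simp only [pvStep, if_neg hx, if_neg (by omega : ¬ x > 0)]
              rw [if_neg (by have := hstr h2; omega)]
              simp only [Prod.mk.injEq]
              constructor <;> first | trivial | omega
            refine ⟨?_, ?_, ?_, ?_⟩
            · intro h; dsimp only at h; omega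
            · intro _
              dsimp only
              rw [if_neg e1', hF', hlen']
              refine ⟨by omega, by omega, by omega, by intro h2'; omega, ?_, ?_⟩
              · intro hp'; omega
              · intro _; simp only [Prod.mk.injEq]; constructor <;> first | trivial | omega
            · dsimp only; omega
            · dsimp only
              rw [hF', if_neg e1', hlen', if_pos hp,
                if_neg (by omega : ¬ ((pvSegScan (a :: t')).1 + 1) % 2 = 0)]
              simp only [Option.some.injEq]
              omega
          · -- odd so far, becomes even
            have hF' : pvStep (List.foldl pvStep (0,0) (a :: t')) x
                = (((a :: t').length : Int) + 1, ((a :: t').length : Int) - (pvSegScan (a :: t')).2.1) := by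
              rw [hod hp]
              simp only [pvStep, if_neg hx, if_neg (by omega : ¬ x > 0)]
              rw [if_neg (by omega)]
              simp only [Prod.mk.injEq]
              constructor <;> first | trivial | omega
            refine ⟨?_, ?_, ?_, ?_⟩
            · intro h; dsimp only at h; omega
            · intro _
              dsimp only
              rw [if_neg e1', hF', hlen']
              refine ⟨by omega, by omega, by omega, by intro h2'; omega, ?_, ?_⟩
              · intro _; simp only [Prod.mk.injEq]; constructor <;> first | trivial | omega
              · intro hp'; omega
            · dsimp only; omega
            · dsimp only
              rw [hF', if_neg e1', hlen', if_neg hp,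
                if_pos (by omega : ((pvSegScan (a :: t')).1 + 1) % 2 = 0)]
              simp only [Option.some.injEq]
              omega
      · exact absurd heq hx
      · -- x > 0 : counters unchanged
        rw [if_neg (by omega : ¬ x < 0)]
        by_cases h0 : (pvSegScan (a :: t')).1 = 0
        · obtain ⟨e1, e2, eF⟩ := ih0 h0
          have hF' : pvStep (List.foldl pvStep (0,0) (a :: t')) x = (((a :: t').length : Int) + 1, 0) := by
            rw [eF]; simp [pvStep, hx, hgt]
          refine ⟨?_, ?_, ?_, ?_⟩
          · intro _
            refine ⟨e1, e2, ?_⟩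
            rw [hF', hlen']
          · intro h; exact absurd h0 h
          · dsimp only; exact ihnn
          · 
            rw [hF', hlen', if_pos (by omega : (pvSegScan (a :: t')).1 % 2 = 0),
              if_pos (by omega : (pvSegScan (a :: t')).1 % 2 = 0)]
            simp only [Option.some.injEq]
            omega
        · obtain ⟨hf0, hfl, hll, hstr, hev, hod⟩ := ihpos h0
          by_cases hp : (pvSegScan (a :: t')).1 % 2 = 0
          · have h2 : 2 ≤ (pvSegScan (a :: t')).1 := by omega
            have hF' : pvStep (List.foldl pvStep (0,0) (a :: t')) x
                = (((a :: t').length : Int) + 1, ((a :: t').length : Int) - (pvSegScan (a :: t')).2.1) := by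
              rw [hev hp]
              simp only [pvStep, if_neg hx, if_pos hgt]
              rw [if_neg (by have := hstr h2; omega)]
              simp only [Prod.mk.injEq]
              constructor <;> first | trivial | omega
            refine ⟨?_, ?_, ?_, ?_⟩
            · intro h; exact absurd h h0
            · intro _
              refine ⟨hf0, hfl, by rw [hlen']; omega, hstr, ?_, ?_⟩
              · intro _; rw [hF', hlen']
                simp only [Prod.mk.injEq]
                constructor <;> first | trivial | omega
              · intro hp'; exact absurd hp hp'
            · dsimp only; exact ihnn
            · 
              rw [hF', hlen', if_pos hp, if_pos hp]
              simp only [Option.some.injEq]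
              omega
          · have hF' : pvStep (List.foldl pvStep (0,0) (a :: t')) x
                = (((a :: t').length : Int) - (pvSegScan (a :: t')).2.1, ((a :: t').length : Int) + 1) := by
              rw [hod hp]
              simp only [pvStep, if_neg hx, if_pos hgt]
              rw [if_neg (by omega)]
              simp only [Prod.mk.injEq]
              constructor <;> first | trivial | omega
            refine ⟨?_, ?_, ?_, ?_⟩
            · intro h; exact absurd h h0
            · intro _
              refine ⟨hf0, hfl, by rw [hlen']; omega, hstr, ?_, ?_⟩
              · intro hp'; exact absurd hp' hp
              · intro _; rw [hF', hlen']
                simp only [Prod.mk.injEq]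
                constructor <;> first | trivial | omega
            · dsimp only; exact ihnn
            · 
              rw [hF', hlen', if_neg hp, if_neg hp]
              simp only [Option.some.injEq]
              omega

-- the loop invariant of A's array loop
theorem pvALoop (nums : List Int) (i : Nat) (hi : i ≤ nums.length) :
    (PySem.List.pyRange 0 (i : Int) 1).foldl (fun (st : List Int × List Int) j =>
      let pos := st.1
      let neg := st.2
      let x := (PySem.List.pyGet? nums j).getD 0
      if x = 0 then
        (pos.set j.toNat 0, neg.set j.toNat 0)
      else if x > 0 then
        let p1 := (PySem.List.pyGet? pos (j - 1)).getD 0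
        let n1 := (PySem.List.pyGet? neg (j - 1)).getD 0
        (pos.set j.toNat (p1 + 1), neg.set j.toNat (if n1 = 0 then 0 else n1 + 1))
      else
        let p1 := (PySem.List.pyGet? pos (j - 1)).getD 0
        let n1 := (PySem.List.pyGet? neg (j - 1)).getD 0
        (pos.set j.toNat (if n1 = 0 then 0 else n1 + 1), neg.set j.toNat (p1 + 1)))
      (List.replicate nums.length 0, List.replicate nums.length 0)
    = ((pvStates (0,0) (nums.take i)).map Prod.fst ++ List.replicate (nums.length - i) 0,
       (pvStates (0,0) (nums.take i)).map Prod.snd ++ List.replicate (nums.length - i) 0) := by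
  induction i with
  | zero =>
    rw [show ((0:Nat) : Int) = 0 from rfl, PySem.List.pyRange_one_eq_nil (by omega)]
    simp [pvStates]
  | succ m ih =>
    have hm : m ≤ nums.length := by omega
    have hmlt : m < nums.length := by omega
    rw [show ((m + 1 : Nat) : Int) = (m : Int) + 1 by push_cast; ring,
      PySem.List.pyRange_one_succ_right (by omega), List.foldl_append, ih hm]
    simp only [List.foldl_cons, List.foldl_nil]
    have hxm : (PySem.List.pyGet? nums (m : Int)).getD 0 = nums[m] := by
      rw [PySem.List.pyGet?_natCast, List.getElem?_eq_getElem hmlt]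
      rfl
    have htoNat : ((m : Int)).toNat = m := by omega
    have hprelen : ∀ f : Int × Int → Int,
        ((pvStates (0,0) (nums.take m)).map f).length = m := by
      intro f
      simp [pvStates_length, List.length_take, Nat.min_eq_left hm]
    have hk : 0 < nums.length - m := by omega
    have hget : ∀ f : Int × Int → Int, f (0,0) = 0 →
        (PySem.List.pyGet? ((pvStates (0,0) (nums.take m)).map f
            ++ List.replicate (nums.length - m) 0) ((m : Int) - 1)).getD 0
          = f ((nums.take m).foldl pvStep (0,0)) := by
      intro f hf0
      cases m with
      | zero =>
        simp only [List.take_zero, pvStates, List.map_nil, List.nil_append, List.foldl_nil]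
        rw [show ((0:Nat) : Int) - 1 = -1 from rfl, PySem.List.pyGet?_neg_one]
        rw [List.getLast?_replicate]
        rw [hf0]
        have : nums ≠ [] := by intro h; subst h; simp at hmlt
        simp [this]
      | succ m' =>
        have htne : nums.take (m' + 1) ≠ [] := by
          intro h
          have := congrArg List.length h
          simp [Nat.min_eq_left hm] at this
        rw [show ((m' + 1 : Nat) : Int) - 1 = ((m' : Nat) : Int) by push_cast; ring,
          PySem.List.pyGet?_natCast]
        have hidx : m' < ((pvStates (0,0) (nums.take (m' + 1))).map f).length := by
          rw [hprelen f]; omega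
        rw [List.getElem?_append_left hidx, List.getElem?_eq_getElem hidx]
        have hlast : ((pvStates (0,0) (nums.take (m' + 1))).map f).getLast?
            = some (f ((nums.take (m' + 1)).foldl pvStep (0,0))) := by
          rw [List.getLast?_map, pvStates_getLast? _ _ htne]
          rfl
        rw [List.getLast?_eq_getElem?] at hlast
        rw [hprelen f] at hlast
        simp only [Nat.add_sub_cancel] at hlast
        rw [List.getElem?_eq_getElem hidx] at hlast
        simp only [Option.some.injEq] at hlast
        simp [hlast]
    have htake : nums.take (m + 1) = nums.take m ++ [nums[m]] := by
      rw [List.take_succ, List.getElem?_eq_getElem hmlt]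
      rfl
    have hstates' : pvStates (0,0) (nums.take (m + 1))
        = pvStates (0,0) (nums.take m) ++ [pvStep ((nums.take m).foldl pvStep (0,0)) nums[m]] := by
      rw [htake, pvStates_append]
      rfl
    have hset : ∀ f : Int × Int → Int, ∀ v : Int,
        ((pvStates (0,0) (nums.take m)).map f ++ List.replicate (nums.length - m) 0).set m v
          = ((pvStates (0,0) (nums.take m)).map f ++ [v]) ++ List.replicate (nums.length - (m+1)) 0 := by
      intro f v
      have := pvSet_prefix ((pvStates (0,0) (nums.take m)).map f) (nums.length - m) v hk
      rw [hprelen f] at this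
      rw [this]
      congr 1
    rw [hxm, htoNat, hget Prod.fst rfl, hget Prod.snd rfl, hstates']
    simp only [List.map_append, List.map_cons, List.map_nil]
    rcases lt_trichotomy nums[m] 0 with hlt | heq | hgt
    · rw [if_neg (by omega), if_neg (by omega), hset Prod.fst, hset Prod.snd]
      simp only [pvStep, if_neg (by omega : ¬ nums[m] = 0), if_neg (by omega : ¬ nums[m] > 0)]
    · rw [if_pos heq, hset Prod.fst, hset Prod.snd]
      simp only [pvStep, if_pos heq]
    · rw [if_neg (by omega), if_pos hgt, hset Prod.fst, hset Prod.snd]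
      simp only [pvStep, if_neg (by omega : ¬ nums[m] = 0), if_pos hgt]

theorem pvA_eq_states (nums : List Int) :
    max_len_pos_product_subarray_non_window nums
      = match PySem.List.max? ((pvStates (0,0) nums).map Prod.fst) (fun y => y) with
        | some m => m | none => 0 := by
  unfold max_len_pos_product_subarray_non_window
  dsimp only
  rw [pvALoop nums nums.length (Nat.le_refl _)]
  simp [List.take_length]

theorem pvSegLemma (l : List Int) (hz : ∀ y ∈ l, y ≠ 0) (hl : l ≠ []) :
    PySem.List.max? ((pvStates (0,0) l).map Prod.fst) (fun y => y)
      = some (if (pvSegScan l).1 % 2 = 0 then (l.length : Int)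
              else max ((pvSegScan l).2.2 - 0) (((l.length : Int) - 1) - (pvSegScan l).2.1)) :=
  (pvSegInv l hz hl).2.2.2

theorem pvB_core (l : List Int) :
    PySem.List.max? ((pvStates (0,0) l).map Prod.fst) (fun y => y)
      = PySem.List.max? (pvGoB l) (fun y => y) := by
  induction l using pvGoB.induct with
  | case1 => simp [pvGoB, pvStates]
  | case2 rest ih =>
    rw [pvStates_zero_head]
    show PySem.List.max? (0 :: (pvStates (0,0) rest).map Prod.fst) _ = _
    rw [show pvGoB (0 :: rest) = 0 :: pvGoB rest from by rw [pvGoB]; simp]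
    exact pvMaxQ_cons_congr 0 _ _ ih
  | case3 x rest hx r2 ih =>
    have hsplit : x :: rest = (x :: rest).takeWhile (· ≠ 0) ++ (x :: rest).dropWhile (· ≠ 0) :=
      (List.takeWhile_append_dropWhile).symm
    set seg := (x :: rest).takeWhile (· ≠ 0) with hseg
    set rest' := (x :: rest).dropWhile (· ≠ 0) with hrest'
    have hsegz : ∀ y ∈ seg, y ≠ 0 := by
      intro y hy
      have := List.mem_takeWhile_imp hy
      simpa using this
    have hsegne : seg ≠ [] := by
      rw [hseg, List.takeWhile_cons, if_pos (by simpa using hx)]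
      simp
    have hstates : pvStates (0,0) (x :: rest)
        = pvStates (0,0) seg ++ pvStates (0,0) rest' := by
      conv_lhs => rw [hsplit]
      rw [pvStates_append]
      congr 1
      cases hr : rest' with
      | nil => rfl
      | cons y t =>
        have hy : y = 0 := by
          have := pvDropWhile_head (fun z => decide (z ≠ 0)) (x :: rest) y
          rw [← hrest', hr] at this
          simpa using this (by simp)
        subst hy
        rw [pvStates_zero_head]
    have hgo : pvGoB (x :: rest)
        = (if (pvSegScan seg).1 % 2 = 0 then (seg.length : Int)
           else max ((pvSegScan seg).2.2 - 0) (((seg.length : Int) - 1) - (pvSegScan seg).2.1)) :: pvGoB rest' := by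
      rw [pvGoB]
      simp only [if_neg hx]
      rfl
    rw [hstates, List.map_append, pvMaxQ_append, pvSegLemma seg hsegz hsegne, hgo]
    have h2 := pvMaxQ_append [(if (pvSegScan seg).1 % 2 = 0 then (seg.length : Int)
           else max ((pvSegScan seg).2.2 - 0) (((seg.length : Int) - 1) - (pvSegScan seg).2.1))] (pvGoB rest')
    simp only [List.singleton_append] at h2
    rw [h2, ih]
    have hx1 : PySem.List.max? [(if (pvSegScan seg).1 % 2 = 0 then (seg.length : Int)
           else max ((pvSegScan seg).2.2 - 0) (((seg.length : Int) - 1) - (pvSegScan seg).2.1))] (fun y => y) = some _ := PySem.List.max?_id_cons _ []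
    rw [hx1]
    rfl

-- ===== VERDICT (by name: the statement is the Claim_ definition above) =====
theorem max_len_pos_product_subarray_non_window_spec : Claim_equal_max_len_pos_product_subarray_non_window := by
  intro nums _ _
  unfold Spec_max_len_pos_product_subarray_non_window max_len_pos_product_subarray_non_window_alt
  rw [pvA_eq_states nums, pvB_core nums]
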